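-- pv_equiv track=rewrite | github.com/sunmh207/AI-Codereview-Gitlab | biz/utils/im/feishu_gitlab_matcher_util.py | match_users
-- ===== SOURCE A (Python) =====
-- from typing import List, Dict, Optional
--
-- def match_users(feishu_users: List[Dict], gitlab_user_map: Dict[str, str]) -> List[Dict]:
--     """
--     匹配用户信息
--
--     Args:
--         feishu_users: 飞书用户列表
--         gitlab_user_map: GitLab用户名映射表
--
--     Returns:
--         匹配结果列表，包含name、open_id、gitlab_username字段
--     """
--     matched_users = []
--     unmatched_users = []
--
--     for feishu_user in feishu_users:
--         name = feishu_user.get('name', '').strip()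
--         open_id = feishu_user.get('open_id', '').strip()
--
--         if not name or not open_id:
--             continue
--
--         # 查找匹配的GitLab用户名
--         gitlab_username = gitlab_user_map.get(name)
--
--         result = {
--             'name': name,
--             'open_id': open_id,
--             'gitlab_username': gitlab_username
--         }
--
--         if gitlab_username:
--             matched_users.append(result)
--         else:
--             unmatched_users.append(result)
--
--     return matched_users, unmatched_users
-- ===== SOURCE B (Python) =====
-- def match_users(feishu_users, gitlab_user_map):
--     records = [
--         {'name': n, 'open_id': o, 'gitlab_username': gitlab_user_map.get(n)}
--         for u in feishu_users
--         if (n := u.get('name', '').strip()) and (o := u.get('open_id', '').strip())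
--     ]
--     # stable sort by a 0/1 key = stable partition: matched block first, input order kept
--     recs = sorted(records, key=lambda r: 0 if r['gitlab_username'] else 1)
--     k = sum(1 for r in records if r['gitlab_username'])
--     return recs[:k], recs[k:]
-- ===== Notes on version B (the rewrite author's own statement) =====
-- stated objective: alternative
-- what changed: A partitions with one loop appending to two accumulators; B cleans the entries into one records list, then stably sorts it by a 0/1 matched key (stable sort by a two-valued key is a stable partition) and splits the sorted list at the matched count.
import Mathlib
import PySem

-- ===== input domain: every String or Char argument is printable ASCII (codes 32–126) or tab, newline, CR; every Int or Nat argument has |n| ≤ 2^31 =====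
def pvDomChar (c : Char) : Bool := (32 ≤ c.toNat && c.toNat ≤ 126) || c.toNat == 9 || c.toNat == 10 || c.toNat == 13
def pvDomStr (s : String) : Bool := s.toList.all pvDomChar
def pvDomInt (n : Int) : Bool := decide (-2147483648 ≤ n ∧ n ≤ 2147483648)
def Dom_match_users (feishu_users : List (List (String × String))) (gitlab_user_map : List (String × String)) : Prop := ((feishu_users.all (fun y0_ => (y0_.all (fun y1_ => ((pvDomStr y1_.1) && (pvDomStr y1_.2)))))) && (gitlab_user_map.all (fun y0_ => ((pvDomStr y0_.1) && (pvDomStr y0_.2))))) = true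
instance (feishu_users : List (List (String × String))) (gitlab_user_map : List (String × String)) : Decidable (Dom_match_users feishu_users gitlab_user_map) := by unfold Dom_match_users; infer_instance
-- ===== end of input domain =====

-- B replaces A's two-accumulator partition loop by: build one cleaned records list, stably sort it by a 0/1 matched key, split at the matched count (alternative decomposition, same results since stable sort by a two-valued key is a stable partition).
-- ===== PORT A =====
-- dict.get k (first-match association-list lookup, per the task's dict convention)
def pvLookup? (d : List (String × String)) (k : String) : Option String :=
  (d.find? (fun p => p.1 == k)).map (·.2)

def pvLookupD (d : List (String × String)) (k dflt : String) : String :=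
  (pvLookup? d k).getD dflt

-- Python truthiness of an Optional[str]: None and "" are falsy
def pvTruthyOS : Option String → Bool
  | none => false
  | some s => s ≠ ""

def match_users (feishu_users : List (List (String × String))) (gitlab_user_map : List (String × String)) : (List (List (String × Option String))) × (List (List (String × Option String))) :=
  feishu_users.foldl
    (fun st feishu_user =>
      let name := PySem.Str.strip (pvLookupD feishu_user "name" "")
      let open_id := PySem.Str.strip (pvLookupD feishu_user "open_id" "")
      if name = "" ∨ open_id = "" then st
      else
        let gitlab_username := pvLookup? gitlab_user_map name
        let result : List (String × Option String) :=
          [("name", some name), ("open_id", some open_id), ("gitlab_username", gitlab_username)]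
        if pvTruthyOS gitlab_username then (st.1 ++ [result], st.2)
        else (st.1, st.2 ++ [result]))
    ([], [])

-- ===== PORT B =====
-- r['gitlab_username'] on a result dict (key always present; Option String values)
def pvLookupOS (r : List (String × Option String)) (k : String) : Option String :=
  ((r.find? (fun p => p.1 == k)).map (·.2)).getD none

-- lambda r: truthiness of r['gitlab_username']
def pvMatchedP (r : List (String × Option String)) : Bool :=
  pvTruthyOS (pvLookupOS r "gitlab_username")

def match_users_alt (feishu_users : List (List (String × String))) (gitlab_user_map : List (String × String)) : (List (List (String × Option String))) × (List (List (String × Option String))) :=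
  let records := feishu_users.filterMap (fun u =>
    let n := PySem.Str.strip (pvLookupD u "name" "")
    let o := PySem.Str.strip (pvLookupD u "open_id" "")
    if n ≠ "" && o ≠ "" then
      some [("name", some n), ("open_id", some o), ("gitlab_username", pvLookup? gitlab_user_map n)]
    else none)
  -- sorted(records, key=lambda r: 0 if r['gitlab_username'] else 1): Python's stable sort
  let recs := PySem.List.sorted records (fun r => if pvMatchedP r then (0 : Int) else 1) false
  -- sum(1 for r in records if r['gitlab_username'])
  let k := records.countP pvMatchedP
  -- recs[:k], recs[k:] — k is a count, so 0 ≤ k ≤ len(recs): the slices are exactly take/drop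
  (recs.take k, recs.drop k)

-- ===== PRECONDITION & SPEC =====
def Spec_match_users (feishu_users : List (List (String × String))) (gitlab_user_map : List (String × String)) (out : (List (List (String × Option String))) × (List (List (String × Option String)))) : Prop := out = match_users_alt feishu_users gitlab_user_map
instance (feishu_users : List (List (String × String))) (gitlab_user_map : List (String × String)) (out : (List (List (String × Option String))) × (List (List (String × Option String)))) : Decidable (Spec_match_users feishu_users gitlab_user_map out) := by unfold Spec_match_users; infer_instance

-- ===== CLAIM (what is proved, stated in full; the proofs are below) =====
def Claim_equal_match_users : Prop := ∀ (feishu_users : List (List (String × String))) (gitlab_user_map : List (String × String)), Dom_match_users feishu_users gitlab_user_map → Spec_match_users feishu_users gitlab_user_map (match_users feishu_users gitlab_user_map)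

-- ===== LEMMAS AND PROOFS =====

-- insertBy skips past a prefix it does not insert before
theorem insertBy_append_of_not_before {α : Type} (bef : α → α → Bool) (x : α) (l0 l1 : List α)
    (h : ∀ y ∈ l0, bef x y = false) :
    PySem.List.insertBy bef x (l0 ++ l1) = l0 ++ PySem.List.insertBy bef x l1 := by
  induction l0 with
  | nil => simp
  | cons a t ih =>
    simp only [List.cons_append, PySem.List.insertBy, h a (by simp)]
    simp only [Bool.false_eq_true, if_false]
    exact congrArg (a :: ·) (ih (fun y hy => h y (by simp [hy])))

-- stable insertion sort with a 0/1 key is a stable partition (loop invariant of the foldl)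
theorem foldl_insertBy_partition {α : Type} (p : α → Bool) (xs l0 l1 : List α)
    (h0 : ∀ a ∈ l0, p a = true) (h1 : ∀ a ∈ l1, p a = false) :
    xs.foldl (fun acc x => PySem.List.insertBy
        (fun a b => decide ((if p a then (0 : Int) else 1) < (if p b then (0 : Int) else 1))) x acc)
      (l0 ++ l1)
    = (l0 ++ xs.filter p) ++ (l1 ++ xs.filter (fun a => ! p a)) := by
  induction xs generalizing l0 l1 with
  | nil => simp
  | cons x xs ih =>
    by_cases hx : p x = true
    · have hskip : ∀ y ∈ l0,
          (fun a b => decide ((if p a then (0 : Int) else 1) < (if p b then (0 : Int) else 1))) x y = false := by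
        intro y hy; simp [hx, h0 y hy]
      rw [List.foldl_cons, insertBy_append_of_not_before _ _ _ _ hskip]
      cases l1 with
      | nil =>
        have := ih (l0 ++ [x]) [] (by intro a ha; rcases List.mem_append.mp ha with h | h
                                      · exact h0 a h
                                      · simp at h; subst h; exact hx) (by simp)
        simpa [hx, List.filter_cons, List.append_assoc, PySem.List.insertBy] using this
      | cons b t =>
        have hb : p b = false := h1 b (by simp)
        have hbef : (fun a b => decide ((if p a then (0 : Int) else 1) < (if p b then (0 : Int) else 1))) x b = true := by
          simp [hx, hb]
        have := ih (l0 ++ [x]) (b :: t)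
          (by intro a ha; rcases List.mem_append.mp ha with h | h
              · exact h0 a h
              · simp at h; subst h; exact hx)
          h1
        simp only [PySem.List.insertBy, hbef, if_true] at *
        simpa [hx, List.filter_cons, List.append_assoc] using this
    · have hx' : p x = false := by simpa using hx
      have hskip : ∀ y ∈ l0 ++ l1,
          (fun a b => decide ((if p a then (0 : Int) else 1) < (if p b then (0 : Int) else 1))) x y = false := by
        intro y _; by_cases hy : p y = true <;> simp [hx', hy]
      rw [List.foldl_cons,
          show l0 ++ l1 = (l0 ++ l1) ++ [] by simp,
          insertBy_append_of_not_before _ _ _ _ hskip]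
      have := ih l0 (l1 ++ [x]) h0
        (by intro a ha; rcases List.mem_append.mp ha with h | h
            · exact h1 a h
            · simp at h; subst h; exact hx')
      simpa [hx', List.filter_cons, List.append_assoc, PySem.List.insertBy] using this

-- PySem.List.sorted by a 0/1 key = filter true ++ filter false
theorem sorted_01 {α : Type} (p : α → Bool) (xs : List α) :
    PySem.List.sorted xs (fun a => if p a then (0 : Int) else 1) false
      = xs.filter p ++ xs.filter (fun a => ! p a) := by
  unfold PySem.List.sorted
  simpa using foldl_insertBy_partition p xs [] [] (by simp) (by simp)

-- the A-side loop, with general accumulators, lands on the filters of B's cleaned records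
theorem match_users_foldl (feishu_users : List (List (String × String))) (gitlab_user_map : List (String × String)) (m0 u0 : List (List (String × Option String))) :
    feishu_users.foldl
      (fun st feishu_user =>
        let name := PySem.Str.strip (pvLookupD feishu_user "name" "")
        let open_id := PySem.Str.strip (pvLookupD feishu_user "open_id" "")
        if name = "" ∨ open_id = "" then st
        else
          let gitlab_username := pvLookup? gitlab_user_map name
          let result : List (String × Option String) :=
            [("name", some name), ("open_id", some open_id), ("gitlab_username", gitlab_username)]
          if pvTruthyOS gitlab_username then (st.1 ++ [result], st.2)
          else (st.1, st.2 ++ [result]))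
      (m0, u0)
    = (m0 ++ (feishu_users.filterMap (fun u =>
        let n := PySem.Str.strip (pvLookupD u "name" "")
        let o := PySem.Str.strip (pvLookupD u "open_id" "")
        if n ≠ "" && o ≠ "" then
          some [("name", some n), ("open_id", some o), ("gitlab_username", pvLookup? gitlab_user_map n)]
        else none)).filter pvMatchedP,
       u0 ++ (feishu_users.filterMap (fun u =>
        let n := PySem.Str.strip (pvLookupD u "name" "")
        let o := PySem.Str.strip (pvLookupD u "open_id" "")
        if n ≠ "" && o ≠ "" then
          some [("name", some n), ("open_id", some o), ("gitlab_username", pvLookup? gitlab_user_map n)]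
        else none)).filter (fun r => ! pvMatchedP r)) := by
  induction feishu_users generalizing m0 u0 with
  | nil => simp
  | cons u rest ih =>
    simp only [List.foldl_cons, List.filterMap_cons]
    by_cases hn : PySem.Str.strip (pvLookupD u "name" "") = ""
    · simpa [hn] using ih m0 u0
    · by_cases ho : PySem.Str.strip (pvLookupD u "open_id" "") = ""
      · simpa [hn, ho] using ih m0 u0
      · by_cases hg : pvTruthyOS (pvLookup? gitlab_user_map (PySem.Str.strip (pvLookupD u "name" ""))) = true
        · simpa [hn, ho, hg, pvMatchedP, pvLookupOS, List.find?, List.filter_cons] using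
            ih (m0 ++ [[("name", some (PySem.Str.strip (pvLookupD u "name" ""))), ("open_id", some (PySem.Str.strip (pvLookupD u "open_id" ""))), ("gitlab_username", pvLookup? gitlab_user_map (PySem.Str.strip (pvLookupD u "name" "")))]]) u0
        · simpa [hn, ho, hg, pvMatchedP, pvLookupOS, List.find?, List.filter_cons] using
            ih m0 (u0 ++ [[("name", some (PySem.Str.strip (pvLookupD u "name" ""))), ("open_id", some (PySem.Str.strip (pvLookupD u "open_id" ""))), ("gitlab_username", pvLookup? gitlab_user_map (PySem.Str.strip (pvLookupD u "name" "")))]])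

-- ===== VERDICT (by name: the statement is the Claim_ definition above) =====
theorem match_users_spec : Claim_equal_match_users := by
  intro fu gm _
  unfold Spec_match_users match_users match_users_alt
  simp only [sorted_01 pvMatchedP, List.countP_eq_length_filter, List.take_left, List.drop_left]
  simpa using match_users_foldl fu gm [] []
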